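-- pv_equiv track=rewrite | github.com/beansthelightkeeper/QuantumOracle | llm2.5.py | get_factorization_chain
-- ===== SOURCE A (Python) =====
-- def get_factorization_chain(n: int) -> list[int]:
--     if not isinstance(n, int) or n <= 0: return []
--     chain = {n}
--     current_num = n
--     for factor in [2, 3]:
--         while current_num % factor == 0:
--             current_num //= factor
--             if current_num > 1: chain.add(current_num)
--     i = 5
--     while i * i <= current_num:
--         for step in [i, i + 2]:
--              while current_num % step == 0:
--                 current_num //= step
--                 if current_num > 1: chain.add(current_num)
--         i += 6
--     if current_num > 1: chain.add(current_num)
--     return sorted(list(chain), reverse=True)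
-- ===== SOURCE B (Python) =====
-- def get_factorization_chain(n: int) -> list[int]:
--     if not isinstance(n, int) or n <= 0: return []
--     # Pass 1: full prime factorization of n, ascending, with multiplicity.
--     fs = []
--     m = n
--     d = 2
--     while d * d <= m:
--         while m % d == 0:
--             fs.append(d)
--             m //= d
--         d += 1
--     if m > 1:
--         fs.append(m)
--     # Pass 2: quotients of n by each prefix product of the factor list.
--     chain = {n}
--     prod = 1
--     for p in fs:
--         prod *= p
--         q = n // prod
--         if q > 1:
--             chain.add(q)
--     return sorted(chain, reverse=True)
-- ===== Notes on version B (the rewrite author's own statement) =====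
-- stated objective: simpler
-- what changed: A interleaves a 6k±1 wheel trial division with on-the-fly collection of quotients into the set; B separates concerns into two plain passes: first compute the ascending prime factorization by simple trial division, then derive the chain as n divided by each prefix product of the factor list.
import Mathlib
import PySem

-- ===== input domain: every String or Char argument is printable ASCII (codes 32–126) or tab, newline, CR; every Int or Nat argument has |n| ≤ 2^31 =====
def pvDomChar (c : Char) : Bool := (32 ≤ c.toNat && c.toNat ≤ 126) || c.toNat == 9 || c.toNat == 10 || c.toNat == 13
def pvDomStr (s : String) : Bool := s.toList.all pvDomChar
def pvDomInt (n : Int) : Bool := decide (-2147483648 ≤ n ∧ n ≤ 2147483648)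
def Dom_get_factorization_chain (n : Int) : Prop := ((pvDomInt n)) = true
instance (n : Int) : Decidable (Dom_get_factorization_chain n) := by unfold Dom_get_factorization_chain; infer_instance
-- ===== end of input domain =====

-- B replaces A's 6k±1 wheel with inline quotient collection by two plain passes (factor list, then prefix-product quotients); objective: simpler.

-- ===== PORT A =====
-- helpers cited by the termination proofs of the loop ports
theorem pvEdivLt {a b : Int} (ha : 0 < a) (hb : 1 < b) : a / b < a :=
  Int.ediv_lt_of_lt_mul (by omega) (by nlinarith)

theorem pvDivGuardLt {f cur : Int} (h : 2 ≤ f ∧ 0 < cur ∧ PySem.Int.mod cur f = 0) :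
    (PySem.Int.floordiv cur f).toNat < cur.toNat := by
  have hd : PySem.Int.floordiv cur f = cur / f := PySem.Int.floordiv_eq_ediv_of_pos (by omega)
  have h2 : cur / f < cur := pvEdivLt h.2.1 (by omega)
  have h3 : 0 ≤ cur / f := Int.ediv_nonneg (by omega) (by omega)
  omega

theorem pvSqMeasureLt {i cur c2 : Int} (h5 : 5 ≤ i) (hsq : i * i ≤ cur) (hle : c2 ≤ cur) :
    (c2 + 6 - (i + 6)).toNat < (cur + 6 - i).toNat := by
  have h3 : i * 1 ≤ i * i := by nlinarith
  omega

theorem pvSqMeasureLt2 {d m m2 : Int} (h2 : 2 ≤ d) (hsq : d * d ≤ m) (hle : m2 ≤ m) :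
    (m2 + 2 - (d + 1)).toNat < (m + 2 - d).toNat := by
  have h3 : d * 1 ≤ d * d := by nlinarith
  omega

-- inner 'while current_num % factor == 0' loop of A (0 < cur / 2 ≤ f are totality guards; invariant in A's run)
def divLoopA (f cur : Int) (chain : PySem.Set Int) : Int × PySem.Set Int :=
  if h : 2 ≤ f ∧ 0 < cur ∧ PySem.Int.mod cur f = 0 then
    let q := PySem.Int.floordiv cur f
    divLoopA f q (if 1 < q then PySem.Set.add chain q else chain)
  else (cur, chain)
termination_by cur.toNat
decreasing_by exact pvDivGuardLt h

-- cited by wheelA's termination proof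
theorem divLoopA_fst_le (f cur : Int) (chain : PySem.Set Int) :
    (divLoopA f cur chain).1 ≤ cur := by
  fun_induction divLoopA with
  | case1 cur chain h q ih =>
    have hq : q = cur / f := PySem.Int.floordiv_eq_ediv_of_pos (by omega)
    have h2 : cur / f < cur := pvEdivLt h.2.1 (by omega)
    exact le_trans ih (by omega)
  | case2 => exact le_refl _

-- A's 'while i * i <= current_num' wheel loop (5 ≤ i is a totality guard; invariant in A's run)
def wheelA (i cur : Int) (chain : PySem.Set Int) : Int × PySem.Set Int :=
  if h : 5 ≤ i ∧ i * i ≤ cur then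
    let st := [i, i + 2].foldl (fun st f => divLoopA f st.1 st.2) (cur, chain)
    wheelA (i + 6) st.1 st.2
  else (cur, chain)
termination_by (cur + 6 - i).toNat
decreasing_by
  exact pvSqMeasureLt h.1 h.2 (le_trans (divLoopA_fst_le ..) (divLoopA_fst_le ..))

def get_factorization_chain (n : Int) : List Int :=
  if n ≤ 0 then []
  else
    let chain : PySem.Set Int := PySem.Set.ofList [n]
    let st1 := [2, 3].foldl (fun st f => divLoopA f st.1 st.2) (n, chain)
    let st2 := wheelA 5 st1.1 st1.2
    let chain2 := if 1 < st2.1 then PySem.Set.add st2.2 st2.1 else st2.2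
    PySem.List.sorted chain2 (fun x => x) true

-- ===== PORT B =====
-- B's inner 'while m % d == 0' loop (0 < m / 2 ≤ d are totality guards; invariant in B's run)
def innerB (d m : Int) (fs : List Int) : Int × List Int :=
  if h : 2 ≤ d ∧ 0 < m ∧ PySem.Int.mod m d = 0 then
    innerB d (PySem.Int.floordiv m d) (fs ++ [d])
  else (m, fs)
termination_by m.toNat
decreasing_by exact pvDivGuardLt h

-- cited by outerB's termination proof
theorem innerB_fst_le (d m : Int) (fs : List Int) : (innerB d m fs).1 ≤ m := by
  fun_induction innerB with
  | case1 m fs h ih =>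
    have hq : PySem.Int.floordiv m d = m / d := PySem.Int.floordiv_eq_ediv_of_pos (by omega)
    have h2 : m / d < m := pvEdivLt h.2.1 (by omega)
    exact le_trans ih (by omega)
  | case2 => exact le_refl _

-- B's outer 'while d * d <= m' loop (2 ≤ d is a totality guard; invariant in B's run)
def outerB (d m : Int) (fs : List Int) : Int × List Int :=
  if h : 2 ≤ d ∧ d * d ≤ m then
    let st := innerB d m fs
    outerB (d + 1) st.1 st.2
  else (m, fs)
termination_by (m + 2 - d).toNat
decreasing_by exact pvSqMeasureLt2 h.1 h.2 (innerB_fst_le ..)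

-- B's 'for p in fs' loop body: multiply the prefix product, collect n // prod when > 1
def stepB (n : Int) (st : Int × PySem.Set Int) (p : Int) : Int × PySem.Set Int :=
  let prod := st.1 * p
  let q := PySem.Int.floordiv n prod
  (prod, if 1 < q then PySem.Set.add st.2 q else st.2)

def get_factorization_chain_alt (n : Int) : List Int :=
  if n ≤ 0 then []
  else
    let st := outerB 2 n []
    let fs := if 1 < st.1 then st.2 ++ [st.1] else st.2
    let chain0 : PySem.Set Int := PySem.Set.ofList [n]
    let res := fs.foldl (stepB n) ((1 : Int), chain0)
    PySem.List.sorted res.2 (fun x => x) true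

-- ===== PRECONDITION & SPEC =====
def Spec_get_factorization_chain (n : Int) (out : List Int) : Prop := out = get_factorization_chain_alt n
instance (n : Int) (out : List Int) : Decidable (Spec_get_factorization_chain n out) := by unfold Spec_get_factorization_chain; infer_instance

-- ===== CLAIM (what is proved, stated in full; the proofs are below) =====
def Claim_equal_get_factorization_chain : Prop := ∀ (n : Int), Dom_get_factorization_chain n → Spec_get_factorization_chain n (get_factorization_chain n)

-- ===== LEMMAS AND PROOFS =====

/-- least divisor > 1 of m (for 1 < m), via Nat.minFac -/
def minDiv (m : Int) : Int := ((m.toNat).minFac : Int)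

theorem minDiv_dvd {m : Int} (h : 1 < m) : minDiv m ∣ m := by
  have h2 : (m.toNat : Int) = m := Int.toNat_of_nonneg (by omega)
  have h3 := Nat.minFac_dvd m.toNat
  rw [minDiv, ← h2]
  exact_mod_cast h3

theorem minDiv_two_le {m : Int} (h : 1 < m) : 2 ≤ minDiv m := by
  have h2 : m.toNat ≠ 1 := by omega
  have h3 := (Nat.minFac_prime h2).two_le
  rw [minDiv]; exact_mod_cast h3

theorem minDiv_min {m d : Int} (h : 1 < m) (hd : 1 < d) (hdvd : d ∣ m) : minDiv m ≤ d := by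
  have h2 : (m.toNat : Int) = m := Int.toNat_of_nonneg (by omega)
  have h3 : (d.toNat : Int) = d := Int.toNat_of_nonneg (by omega)
  have hdvd' : d.toNat ∣ m.toNat := by
    rw [← Int.natCast_dvd_natCast, h2, h3]; exact hdvd
  have h4 := Nat.minFac_le_of_dvd (by omega) hdvd'
  rw [minDiv, ← h3]; exact_mod_cast h4

/-- reference chain of quotients: repeatedly divide by the least divisor, keep quotients > 1 -/
def chainI (m : Int) : List Int :=
  if h : 1 < m then
    (if 1 < m / minDiv m then [m / minDiv m] else []) ++ chainI (m / minDiv m)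
  else []
termination_by m.toNat
decreasing_by
  have h1 := minDiv_two_le h
  have h2 : m / minDiv m < m := pvEdivLt (by omega) (by omega)
  have h3 : 0 ≤ m / minDiv m := Int.ediv_nonneg (by omega) (by omega)
  omega

/-- reference ascending prime factor list -/
def factI (m : Int) : List Int :=
  if h : 1 < m then minDiv m :: factI (m / minDiv m) else []
termination_by m.toNat
decreasing_by
  have h1 := minDiv_two_le h
  have h2 : m / minDiv m < m := pvEdivLt (by omega) (by omega)
  have h3 : 0 ≤ m / minDiv m := Int.ediv_nonneg (by omega) (by omega)
  omega

/-- no divisor strictly between 1 and k -/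
def NoDiv (k m : Int) : Prop := ∀ d : Int, 1 < d → d < k → ¬ d ∣ m

theorem NoDiv_succ {k m : Int} (h : NoDiv k m) (hk : ¬ k ∣ m) : NoDiv (k + 1) m := by
  intro d hd1 hd2 hdvd
  rcases (by omega : d < k ∨ d = k) with h' | h'
  · exact h d hd1 h' hdvd
  · exact hk (h' ▸ hdvd)

theorem NoDiv_le {k k' m : Int} (h : k' ≤ k) (hP : NoDiv k m) : NoDiv k' m :=
  fun d hd1 hd2 => hP d hd1 (by omega)

theorem NoDiv_succ_comp {k m e : Int} (h : NoDiv k m) (he1 : 1 < e) (he2 : e < k)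
    (hek : e ∣ k) : NoDiv (k + 1) m := by
  intro d hd1 hd2 hdvd
  rcases (by omega : d < k ∨ d = k) with h' | h'
  · exact h d hd1 h' hdvd
  · exact h e he1 he2 (dvd_trans hek (h' ▸ hdvd))

theorem minDiv_eq {m f : Int} (hm : 0 < m) (hf : 2 ≤ f) (hdvd : f ∣ m) (hP : NoDiv f m) :
    minDiv m = f := by
  have hm1 : 1 < m := by
    have := Int.le_of_dvd hm hdvd; omega
  have hle := minDiv_min hm1 (by omega) hdvd
  have h2 := minDiv_two_le hm1
  have hdd := minDiv_dvd hm1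
  by_contra hne
  exact hP (minDiv m) (by omega) (by omega) hdd

theorem chainI_unfold_of {m f : Int} (hm : 0 < m) (hf : 2 ≤ f) (hdvd : f ∣ m) (hP : NoDiv f m) :
    chainI m = (if 1 < m / f then [m / f] else []) ++ chainI (m / f) := by
  have hm1 : 1 < m := by have := Int.le_of_dvd hm hdvd; omega
  rw [chainI]
  simp [hm1, minDiv_eq hm hf hdvd hP]

theorem factI_unfold_of {m f : Int} (hm : 0 < m) (hf : 2 ≤ f) (hdvd : f ∣ m) (hP : NoDiv f m) :
    factI m = f :: factI (m / f) := by
  have hm1 : 1 < m := by have := Int.le_of_dvd hm hdvd; omega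
  rw [factI]
  simp [hm1, minDiv_eq hm hf hdvd hP]

theorem chainI_of_le_one {m : Int} (h : m ≤ 1) : chainI m = [] := by
  rw [chainI]; simp [show ¬ 1 < m by omega]

theorem factI_of_le_one {m : Int} (h : m ≤ 1) : factI m = [] := by
  rw [factI]; simp [show ¬ 1 < m by omega]

/-- below i², NoDiv i means 1 or prime: empty chain -/
theorem chainI_eq_nil_of_small {m i : Int} (hi : 2 ≤ i) (hm : 0 < m) (hP : NoDiv i m) (hsq : m < i * i) :
    chainI m = [] := by
  rcases (by omega : m ≤ 1 ∨ 1 < m) with h1 | h1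
  · exact chainI_of_le_one h1
  · have hf2 := minDiv_two_le h1
    have hdd := minDiv_dvd h1
    have hfi : i ≤ minDiv m := by
      by_contra hlt
      exact hP (minDiv m) (by omega) (by omega) hdd
    have hq : minDiv m * (m / minDiv m) = m := Int.mul_ediv_cancel' hdd
    have hq1 : 0 < m / minDiv m := by
      rcases (by omega : m / minDiv m ≤ 0 ∨ 0 < m / minDiv m) with h | h
      · nlinarith
      · exact h
    have hqd : (m / minDiv m) ∣ m :=
      ⟨minDiv m, by linarith [hq, mul_comm (minDiv m) (m / minDiv m)]⟩
    have hqe : m / minDiv m = 1 := by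
      by_contra hne
      have hq2 : 1 < m / minDiv m := by omega
      have hqi : i ≤ m / minDiv m := by
        by_contra hlt
        exact hP (m / minDiv m) (by omega) (by omega) hqd
      nlinarith [mul_le_mul hfi hqi (by omega : (0:Int) ≤ i) (by omega : (0:Int) ≤ minDiv m)]
    have hu : chainI m = (if 1 < m / minDiv m then [m / minDiv m] else []) ++ chainI (m / minDiv m) := by
      rw [chainI]; simp [h1]
    rw [hu, hqe, chainI_of_le_one (le_refl (1:Int))]
    simp

/-- below i², NoDiv i and 1 < m means m is prime: singleton factor list -/
theorem factI_of_small {m i : Int} (hi : 2 ≤ i) (h1 : 1 < m) (hP : NoDiv i m) (hsq : m < i * i) :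
    factI m = [m] := by
  have hf2 := minDiv_two_le h1
  have hdd := minDiv_dvd h1
  have hfi : i ≤ minDiv m := by
    by_contra hlt
    exact hP (minDiv m) (by omega) (by omega) hdd
  have hq : minDiv m * (m / minDiv m) = m := Int.mul_ediv_cancel' hdd
  have hq1 : 0 < m / minDiv m := by
    rcases (by omega : m / minDiv m ≤ 0 ∨ 0 < m / minDiv m) with h | h
    · nlinarith
    · exact h
  have hqd : (m / minDiv m) ∣ m :=
    ⟨minDiv m, by linarith [hq, mul_comm (minDiv m) (m / minDiv m)]⟩
  have hqe : m / minDiv m = 1 := by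
    by_contra hne
    have hq2 : 1 < m / minDiv m := by omega
    have hqi : i ≤ m / minDiv m := by
      by_contra hlt
      exact hP (m / minDiv m) (by omega) (by omega) hqd
    nlinarith [mul_le_mul hfi hqi (by omega : (0:Int) ≤ i) (by omega : (0:Int) ≤ minDiv m)]
  have hmd : minDiv m = m := by nlinarith
  have hu : factI m = minDiv m :: factI (m / minDiv m) := by
    rw [factI]; simp [h1]
  rw [hu, hqe, hmd, factI_of_le_one (le_refl (1:Int))]

theorem divLoopA_spec (f cur : Int) (S : PySem.Set Int) :
    2 ≤ f → 0 < cur → NoDiv f cur → (∀ x ∈ S, cur ≤ x) → (1 < cur → cur ∈ S) →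
    0 < (divLoopA f cur S).1 ∧ (divLoopA f cur S).1 ≤ cur ∧ ¬ f ∣ (divLoopA f cur S).1 ∧
    NoDiv f (divLoopA f cur S).1 ∧
    (∃ seg, (divLoopA f cur S).2 = S ++ seg ∧
      chainI cur = seg ++ chainI (divLoopA f cur S).1) ∧
    (∀ x ∈ (divLoopA f cur S).2, (divLoopA f cur S).1 ≤ x) ∧
    (1 < (divLoopA f cur S).1 → (divLoopA f cur S).1 ∈ (divLoopA f cur S).2) := by
  fun_induction divLoopA f cur S with
  | case2 cur S h =>
    intro hf hc hP hS hmem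
    have hnd : ¬ f ∣ cur := by
      intro hdvd
      exact h ⟨hf, hc, (PySem.Int.mod_eq_zero_iff_dvd cur f).mpr hdvd⟩
    exact ⟨hc, le_refl _, hnd, hP, ⟨[], by simp⟩, hS, hmem⟩
  | case1 cur S h q ih =>
    simp only [dite_eq_ite] at ih
    intro hf hc hP hS hmem
    have hmod : f ∣ cur := (PySem.Int.mod_eq_zero_iff_dvd cur f).mp h.2.2
    have hqe : q = cur / f := PySem.Int.floordiv_eq_ediv_of_pos (by omega)
    have hmul : f * (cur / f) = cur := Int.mul_ediv_cancel' hmod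
    have hqpos : 0 < q := by nlinarith [hmul, hqe]
    have hqlt : q < cur := by rw [hqe]; exact pvEdivLt hc (by omega)
    have hqdvd : q ∣ cur := ⟨f, by rw [hqe]; linarith [hmul, mul_comm f (cur / f)]⟩
    have hPq : NoDiv f q := fun d hd1 hd2 hdvd => hP d hd1 hd2 (hdvd.trans hqdvd)
    have hS' : ∀ x ∈ (if 1 < q then PySem.Set.add S q else S), q ≤ x := by
      split_ifs with hq1
      · intro x hx
        rcases (PySem.Set.mem_add S q x).mp hx with hx | hx
        · exact le_trans (by omega) (hS x hx)
        · omega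
      · intro x hx; exact le_trans (by omega) (hS x hx)
    have hmem' : 1 < q → q ∈ (if 1 < q then PySem.Set.add S q else S) := by
      intro hq1; simp only [if_pos hq1]; exact (PySem.Set.mem_add S q q).mpr (Or.inr rfl)
    obtain ⟨ih1, ih2, ih3, ih4, ⟨seg, ihseg, ihchain⟩, ih6, ih7⟩ :=
      ih hf hqpos hPq hS' hmem'
    refine ⟨ih1, by omega, ih3, ih4, ?_, ih6, ih7⟩
    have hnotmem : q ∉ S := fun hx => absurd (hS q hx) (by omega)
    have hchain : chainI cur = (if 1 < q then [q] else []) ++ chainI q := by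
      rw [chainI_unfold_of hc hf hmod hP, hqe]
    refine ⟨(if 1 < q then [q] else []) ++ seg, ?_, by rw [hchain, ihchain]; simp⟩
    rw [ihseg]
    split_ifs with hq1
    · rw [PySem.Set.add_of_not_mem hnotmem]; simp
    · simp

theorem wheelA_spec (i cur : Int) (S : PySem.Set Int) :
    5 ≤ i → i % 6 = 5 → 0 < cur → NoDiv i cur → (∀ x ∈ S, cur ≤ x) → (1 < cur → cur ∈ S) →
    0 < (wheelA i cur S).1 ∧
    (∃ seg, (wheelA i cur S).2 = S ++ seg ∧
      chainI cur = seg ++ chainI (wheelA i cur S).1) ∧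
    chainI (wheelA i cur S).1 = [] ∧
    (1 < (wheelA i cur S).1 → (wheelA i cur S).1 ∈ (wheelA i cur S).2) := by
  fun_induction wheelA i cur S with
  | case2 i cur S h =>
    intro hi hi6 hc hP hS hmem
    have hsq : cur < i * i := by
      rcases not_and_or.mp h with h' | h'
      · omega
      · omega
    have hnil : chainI cur = [] := chainI_eq_nil_of_small (by omega) hc hP hsq
    exact ⟨hc, ⟨[], (List.append_nil S).symm, by simp [hnil]⟩, hnil, hmem⟩
  | case1 i cur S h st ih =>
    intro hi hi6 hc hP hS hmem
    have hst : st = divLoopA (i + 2) (divLoopA i cur S).1 (divLoopA i cur S).2 := rfl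
    obtain ⟨a1, a2, a3, a4, ⟨seg1, aseg, achain⟩, a6, a7⟩ :=
      divLoopA_spec i cur S (by omega) hc hP hS hmem
    have hP1 : NoDiv (i + 2) (divLoopA i cur S).1 := by
      have h' := NoDiv_succ_comp (NoDiv_succ a4 a3) (e := 2) (by omega) (by omega) (by omega)
      exact NoDiv_le (by omega) h'
    obtain ⟨b1, b2, b3, b4, ⟨seg2, bseg, bchain⟩, b6, b7⟩ :=
      divLoopA_spec (i + 2) (divLoopA i cur S).1 (divLoopA i cur S).2 (by omega) a1 hP1 a6 a7
    have hP2 : NoDiv (i + 6) st.1 := by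
      rw [hst]
      have h3 := NoDiv_succ b4 b3
      have h4 := NoDiv_succ_comp (NoDiv_le (le_refl _) h3) (e := 2) (by omega) (by omega) (by omega)
      have h5 := NoDiv_succ_comp (NoDiv_le (by omega : i + 4 ≤ i + 2 + 1 + 1) h4) (e := 3) (by omega) (by omega) (by omega)
      have h6 := NoDiv_succ_comp (NoDiv_le (by omega : i + 5 ≤ i + 4 + 1) h5) (e := 2) (by omega) (by omega) (by omega)
      exact NoDiv_le (by omega) h6
    have hst1 : 0 < st.1 := by rw [hst]; exact b1
    have hstS : ∀ x ∈ st.2, st.1 ≤ x := by rw [hst]; exact b6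
    have hstm : 1 < st.1 → st.1 ∈ st.2 := by rw [hst]; exact b7
    obtain ⟨w1, ⟨segw, wseg, wchain⟩, w3, w4⟩ :=
      ih (by omega) (by omega) hst1 hP2 hstS hstm
    refine ⟨w1, ?_, w3, w4⟩
    refine ⟨seg1 ++ (seg2 ++ segw), ?_, ?_⟩
    · rw [wseg, hst, bseg, aseg]; simp
    · rw [achain, bchain]
      have : chainI st.1 = segw ++ chainI (wheelA (i + 6) st.1 st.2).1 := wchain
      rw [hst] at this
      rw [this]
      simp [hst]

theorem innerB_spec (f m : Int) (fs : List Int) :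
    2 ≤ f → 0 < m → NoDiv f m →
    0 < (innerB f m fs).1 ∧ (innerB f m fs).1 ≤ m ∧ ¬ f ∣ (innerB f m fs).1 ∧
    NoDiv f (innerB f m fs).1 ∧
    (∃ facs, (innerB f m fs).2 = fs ++ facs ∧
      factI m = facs ++ factI (innerB f m fs).1) := by
  fun_induction innerB f m fs with
  | case2 m fs h =>
    intro hf hm hP
    have hnd : ¬ f ∣ m := by
      intro hdvd
      exact h ⟨hf, hm, (PySem.Int.mod_eq_zero_iff_dvd m f).mpr hdvd⟩
    exact ⟨hm, le_refl _, hnd, hP, ⟨[], by simp⟩⟩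
  | case1 m fs h ih =>
    intro hf hm hP
    have hmod : f ∣ m := (PySem.Int.mod_eq_zero_iff_dvd m f).mp h.2.2
    have hqe : PySem.Int.floordiv m f = m / f := PySem.Int.floordiv_eq_ediv_of_pos (by omega)
    have hmul : f * (m / f) = m := Int.mul_ediv_cancel' hmod
    have hqpos : 0 < PySem.Int.floordiv m f := by nlinarith [hmul, hqe]
    have hqlt : PySem.Int.floordiv m f < m := by rw [hqe]; exact pvEdivLt hm (by omega)
    have hqdvd : PySem.Int.floordiv m f ∣ m :=
      ⟨f, by rw [hqe]; linarith [hmul, mul_comm f (m / f)]⟩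
    have hPq : NoDiv f (PySem.Int.floordiv m f) :=
      fun d hd1 hd2 hdvd => hP d hd1 hd2 (hdvd.trans hqdvd)
    obtain ⟨ih1, ih2, ih3, ih4, ⟨facs, ihfs, ihfact⟩⟩ := ih hf hqpos hPq
    refine ⟨ih1, by omega, ih3, ih4, f :: facs, ?_, ?_⟩
    · rw [ihfs]; simp
    · rw [factI_unfold_of hm hf hmod hP, ← hqe, ihfact]; simp

theorem outerB_spec (d m : Int) (fs : List Int) :
    2 ≤ d → 0 < m → NoDiv d m →
    0 < (outerB d m fs).1 ∧
    (∃ facs, (outerB d m fs).2 = fs ++ facs ∧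
      factI m = facs ++ factI (outerB d m fs).1) ∧
    (1 < (outerB d m fs).1 → factI (outerB d m fs).1 = [(outerB d m fs).1]) ∧
    ((outerB d m fs).1 ≤ 1 → factI (outerB d m fs).1 = []) := by
  fun_induction outerB d m fs with
  | case2 d m fs h =>
    intro hd hm hP
    have hsq : m < d * d := by
      rcases not_and_or.mp h with h' | h'
      · omega
      · omega
    refine ⟨hm, ⟨[], by simp⟩, ?_, fun h1 => factI_of_le_one h1⟩
    intro h1
    exact factI_of_small (by omega) h1 hP hsq
  | case1 d m fs h st ih =>
    intro hd hm hP
    have hst : st = innerB d m fs := rfl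
    obtain ⟨a1, a2, a3, a4, ⟨facs1, aseg, afact⟩⟩ := innerB_spec d m fs hd hm hP
    have hP1 : NoDiv (d + 1) st.1 := by rw [hst]; exact NoDiv_succ a4 a3
    have hst1 : 0 < st.1 := by rw [hst]; exact a1
    obtain ⟨w1, ⟨facs2, wseg, wfact⟩, w3, w4⟩ := ih (by omega) hst1 hP1
    refine ⟨w1, ⟨facs1 ++ facs2, ?_, ?_⟩, w3, w4⟩
    · rw [wseg, hst, aseg]; simp
    · rw [afact]
      have : factI st.1 = facs2 ++ factI (outerB (d + 1) st.1 st.2).1 := wfact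
      rw [hst] at this
      rw [this]
      simp [hst]

theorem passB_spec (n cur : Int) : ∀ (prod : Int) (S : PySem.Set Int), 0 < cur → 0 < prod →
    n = prod * cur → (∀ x ∈ S, cur ≤ x) →
    ((factI cur).foldl (stepB n) (prod, S)).2 = S ++ chainI cur := by
  fun_induction factI cur with
  | case2 m h =>
    intro prod S hc hp hn hS
    simp [chainI_of_le_one (by omega : m ≤ 1)]
  | case1 m h ih =>
    intro prod S hc hp hn hS
    have hf2 := minDiv_two_le h
    have hdd := minDiv_dvd h
    have hmul : minDiv m * (m / minDiv m) = m := Int.mul_ediv_cancel' hdd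
    have hqpos : 0 < m / minDiv m := by
      rcases (by omega : m / minDiv m ≤ 0 ∨ 0 < m / minDiv m) with h' | h'
      · nlinarith
      · exact h'
    have hqlt : m / minDiv m < m := pvEdivLt (by omega) (by omega)
    have hq : PySem.Int.floordiv n (prod * minDiv m) = m / minDiv m := by
      have hpos : 0 < prod * minDiv m := mul_pos hp (by omega)
      rw [PySem.Int.floordiv_eq_ediv_of_pos hpos]
      have hn' : n = (prod * minDiv m) * (m / minDiv m) := by
        rw [hn]; linear_combination (-prod) * hmul
      rw [hn']
      exact Int.mul_ediv_cancel_left _ (by omega)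
    have hstep : stepB n (prod, S) (minDiv m) =
        (prod * minDiv m,
          if 1 < m / minDiv m then PySem.Set.add S (m / minDiv m) else S) := by
      simp [stepB, hq]
    have hS' : ∀ x ∈ (if 1 < m / minDiv m then PySem.Set.add S (m / minDiv m) else S),
        m / minDiv m ≤ x := by
      split_ifs with hq1
      · intro x hx
        rcases (PySem.Set.mem_add S (m / minDiv m) x).mp hx with hx | hx
        · exact le_trans (by omega) (hS x hx)
        · omega
      · intro x hx; exact le_trans (by omega) (hS x hx)
    have hrec := ih (prod * minDiv m)
      (if 1 < m / minDiv m then PySem.Set.add S (m / minDiv m) else S)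
      hqpos (mul_pos hp (by omega)) (by rw [hn]; linear_combination (-prod) * hmul) hS'
    rw [List.foldl_cons, hstep, hrec]
    have hnotmem : m / minDiv m ∉ S := fun hx => absurd (hS _ hx) (by omega)
    have hcu : chainI m = (if 1 < m / minDiv m then [m / minDiv m] else []) ++ chainI (m / minDiv m) := by
      rw [chainI]; simp [h]
    rw [hcu]
    split_ifs with hq1
    · rw [PySem.Set.add_of_not_mem hnotmem]; simp
    · simp

theorem A_result (n : Int) (hn : 0 < n) :
    get_factorization_chain n = PySem.List.sorted (n :: chainI n) (fun x => x) true := by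
  rw [get_factorization_chain, if_neg (by omega)]
  have hofl : PySem.Set.ofList [n] = [n] := PySem.Set.ofList_eq_self_of_nodup [n] (List.nodup_singleton n)
  have hfold : [2, 3].foldl (fun st f => divLoopA f st.1 st.2) (n, PySem.Set.ofList [n])
      = divLoopA 3 (divLoopA 2 n [n]).1 (divLoopA 2 n [n]).2 := by
    simp [List.foldl, hofl]
  have hP2 : NoDiv 2 n := fun d h1 h2 _ => by omega
  obtain ⟨a1, a2, a3, a4, ⟨seg1, aseg, achain⟩, a6, a7⟩ :=
    divLoopA_spec 2 n [n] (by omega) hn hP2 (by simp) (by simp)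
  have hP3 : NoDiv 3 (divLoopA 2 n [n]).1 := NoDiv_succ a4 a3
  obtain ⟨b1, b2, b3, b4, ⟨seg2, bseg, bchain⟩, b6, b7⟩ :=
    divLoopA_spec 3 (divLoopA 2 n [n]).1 (divLoopA 2 n [n]).2 (by omega) a1 hP3 a6 a7
  have hP5 : NoDiv 5 (divLoopA 3 (divLoopA 2 n [n]).1 (divLoopA 2 n [n]).2).1 := by
    have h4 := NoDiv_succ b4 b3
    have h5 := NoDiv_succ_comp (NoDiv_le (by omega : (4:Int) ≤ 3 + 1) h4) (e := 2) (by omega) (by omega) (by omega)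
    exact NoDiv_le (by omega) h5
  obtain ⟨w1, ⟨segw, wseg, wchain⟩, w3, w4⟩ :=
    wheelA_spec 5 (divLoopA 3 (divLoopA 2 n [n]).1 (divLoopA 2 n [n]).2).1
      (divLoopA 3 (divLoopA 2 n [n]).1 (divLoopA 2 n [n]).2).2
      (by omega) (by decide) b1 hP5 b6 b7
  simp only [hfold]
  set p1 := divLoopA 2 n [n] with hp1
  set p2 := divLoopA 3 p1.1 p1.2 with hp2
  set w := wheelA 5 p2.1 p2.2 with hw
  have hchain : chainI n = seg1 ++ (seg2 ++ segw) := by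
    rw [achain, bchain, wchain, w3]; simp
  have hlist : w.2 = n :: chainI n := by
    rw [wseg, bseg, aseg, hchain]; simp
  have hfinal : (if 1 < w.1 then PySem.Set.add w.2 w.1 else w.2) = w.2 := by
    split_ifs with h1
    · exact PySem.Set.add_of_mem (w4 h1)
    · rfl
  rw [hfinal, hlist]

theorem B_result (n : Int) (hn : 0 < n) :
    get_factorization_chain_alt n = PySem.List.sorted (n :: chainI n) (fun x => x) true := by
  rw [get_factorization_chain_alt, if_neg (by omega)]
  have hofl : PySem.Set.ofList [n] = [n] := PySem.Set.ofList_eq_self_of_nodup [n] (List.nodup_singleton n)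
  have hP2 : NoDiv 2 n := fun d h1 h2 _ => by omega
  obtain ⟨a1, ⟨facs, aseg, afact⟩, a3, a4⟩ := outerB_spec 2 n [] (by omega) hn hP2
  have hfs : (if 1 < (outerB 2 n []).1 then (outerB 2 n []).2 ++ [(outerB 2 n []).1]
      else (outerB 2 n []).2) = factI n := by
    split_ifs with h1
    · rw [aseg, afact, a3 h1]; simp
    · rw [aseg, afact, a4 (by omega)]; simp
  have hpass := passB_spec n n 1 [n] hn (by omega) (by ring) (by simp)
  simp only [hofl, hfs, hpass]
  rfl

-- ===== VERDICT (by name: the statement is the Claim_ definition above) =====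
theorem get_factorization_chain_spec : Claim_equal_get_factorization_chain := by
  intro n _
  unfold Spec_get_factorization_chain
  rcases (by omega : n ≤ 0 ∨ 0 < n) with h | h
  · rw [get_factorization_chain, get_factorization_chain_alt]; simp [h]
  · rw [A_result n h, B_result n h]
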